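-- pv_equiv track=rewrite | github.com/mashidavid2/autofis_pytorch | src/model/auto_deep_fm.py | generate_pairs
-- ===== SOURCE A (Python) =====
-- from itertools import combinations
--
-- def generate_pairs(ranges=range(1, 100), mask=None, order=2):
--     res = []
--     for i in range(order):
--         res.append([])
--     for i, pair in enumerate(list(combinations(ranges, order))):
--         if mask is None or len(mask) == 0 or mask[i] == 1:
--             for j in range(order):
--                 res[j].append(pair[j])
--     return res
-- ===== SOURCE B (Python) =====
-- from itertools import combinations
--
-- def generate_pairs(ranges=range(1, 100), mask=None, order=2):
--     kept = [pair for i, pair in enumerate(combinations(ranges, order))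
--             if mask is None or len(mask) == 0 or mask[i] == 1]
--     if kept:
--         return [list(col) for col in zip(*kept)]
--     return [[] for _ in range(order)]
-- ===== Notes on version B (the rewrite author's own statement) =====
-- stated objective: simpler
-- what changed: B replaces A's pre-allocated columns filled element-by-element inside the combination loop with a two-phase filter-then-transpose: it first collects the mask-retained combinations, then transposes them with zip(*kept) (with an explicit empty case to keep the fixed column count).
import Mathlib
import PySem

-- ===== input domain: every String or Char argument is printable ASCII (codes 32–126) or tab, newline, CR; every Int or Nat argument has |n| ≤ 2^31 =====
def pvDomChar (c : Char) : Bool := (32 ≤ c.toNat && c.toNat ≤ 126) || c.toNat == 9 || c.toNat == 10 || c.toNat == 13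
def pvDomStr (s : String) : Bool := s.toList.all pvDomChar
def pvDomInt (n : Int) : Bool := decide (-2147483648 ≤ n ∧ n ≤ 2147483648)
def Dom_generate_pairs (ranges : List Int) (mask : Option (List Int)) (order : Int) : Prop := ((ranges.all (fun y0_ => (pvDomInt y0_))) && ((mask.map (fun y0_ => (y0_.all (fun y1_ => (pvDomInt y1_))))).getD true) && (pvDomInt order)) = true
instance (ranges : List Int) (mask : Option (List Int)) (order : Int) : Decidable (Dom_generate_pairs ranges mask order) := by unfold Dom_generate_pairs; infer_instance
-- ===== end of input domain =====

-- B is simpler: filter the mask-retained combinations first, then transpose once, instead of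
-- A's element-by-element filling of pre-allocated columns. Return-value equivalence only.

-- ===== PORT A =====
-- shared helper: the literal mask test 'mask is None or len(mask) == 0 or mask[i] == 1'
-- (identical in both Pythons)
def pvKeep (mask : Option (List Int)) (i : Int) : Bool :=
  match mask with
  | none => true
  | some m => m.length == 0 || (PySem.List.pyGetD m i 0 == 1)

def generate_pairs (ranges : List Int) (mask : Option (List Int)) (order : Int) : List (List Int) :=
  -- res = []; for i in range(order): res.append([])
  let res : List (List Int) := (PySem.List.pyRange 0 order 1).foldl (fun r _ => r ++ [([] : List Int)]) []
  -- for i, pair in enumerate(list(combinations(ranges, order))): …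
  (PySem.List.enumerate (PySem.List.combinations ranges order.toNat) 0).foldl
    (fun res ip =>
      if pvKeep mask ip.1 then
        -- for j in range(order): res[j].append(pair[j])
        (PySem.List.pyRange 0 order 1).foldl
          (fun r j => PySem.List.pySetD r j (PySem.List.pyGetD r j [] ++ [PySem.List.pyGetD ip.2 j 0])) res
      else res) res

-- ===== PORT B =====
-- zip(*rows) as list of columns (zip truncates to the shortest row)
def pvZipStar (rows : List (List Int)) : List (List Int) :=
  match rows with
  | [] => []
  | r :: rs =>
      (List.range (rs.foldl (fun m l => min m l.length) r.length)).map
        (fun j => (r :: rs).map (fun p => p.getD j 0))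

def generate_pairs_alt (ranges : List Int) (mask : Option (List Int)) (order : Int) : List (List Int) :=
  let kept := (PySem.List.enumerate (PySem.List.combinations ranges order.toNat) 0).filterMap
      (fun ip => if pvKeep mask ip.1 then some ip.2 else none)
  if kept.isEmpty then List.replicate order.toNat ([] : List Int) else pvZipStar kept

-- ===== PRECONDITION & SPEC =====
-- Pre_ excludes exactly the inputs where the Python A raises: order < 0 (ValueError from
-- combinations) and a non-empty mask shorter than the number of combinations (IndexError at mask[i]).
-- the mask test, short-circuited so it decides fast: a mask is acceptable when it is absent or
-- empty, or when there are no combinations (order exceeds len(ranges)), or when it covers them all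
def pvMaskOk (ranges : List Int) (mask : Option (List Int)) (order : Int) : Bool :=
  match mask with
  | none => true
  | some m =>
      if m.isEmpty then true
      else if ranges.length < order.toNat then true
      else decide (Nat.choose ranges.length order.toNat ≤ m.length)

def Pre_generate_pairs (ranges : List Int) (mask : Option (List Int)) (order : Int) : Prop :=
  0 ≤ order ∧ pvMaskOk ranges mask order = true

instance (ranges : List Int) (mask : Option (List Int)) (order : Int) : Decidable (Pre_generate_pairs ranges mask order) := by unfold Pre_generate_pairs; infer_instance

def pvWitness_generate_pairs : List Int × Option (List Int) × Int := ([1, 2, 3], some [1, 0, 1], 2)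

def Spec_generate_pairs (ranges : List Int) (mask : Option (List Int)) (order : Int) (out : List (List Int)) : Prop := out = generate_pairs_alt ranges mask order
instance (ranges : List Int) (mask : Option (List Int)) (order : Int) (out : List (List Int)) : Decidable (Spec_generate_pairs ranges mask order out) := by unfold Spec_generate_pairs; infer_instance

-- ===== CLAIM (what is proved, stated in full; the proofs are below) =====
def Claim_equal_generate_pairs : Prop := ∀ (ranges : List Int) (mask : Option (List Int)) (order : Int), Dom_generate_pairs ranges mask order → Pre_generate_pairs ranges mask order → Spec_generate_pairs ranges mask order (generate_pairs ranges mask order)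

-- ===== LEMMAS AND PROOFS =====

-- the appended-singleton column: zipApp c p appends p's j-th element to c's j-th column
def pvZipApp (c : List (List Int)) (p : List Int) : List (List Int) :=
  List.zipWith (fun col x => col ++ [x]) c p

-- A's initial loop 'for i in range(order): res.append([])' builds a replicate
theorem pv_initfold : ∀ (l : List Int) (acc : List (List Int)),
    l.foldl (fun r _ => r ++ [([] : List Int)]) acc = acc ++ List.replicate l.length [] := by
  intro l
  induction l with
  | nil => intro acc; simp
  | cons x t ih => intro acc; simp [List.foldl_cons, ih, List.replicate_succ]

-- A's conditional fold over the enumerated combinations equals the fold over the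
-- mask-retained combinations (B's 'kept')
theorem pvA_filter (mask : Option (List Int)) (order : Int) :
    ∀ (l : List (Int × List Int)) (acc : List (List Int)),
      l.foldl (fun res ip =>
          if pvKeep mask ip.1 then
            (PySem.List.pyRange 0 order 1).foldl
              (fun r j => PySem.List.pySetD r j (PySem.List.pyGetD r j [] ++ [PySem.List.pyGetD ip.2 j 0])) res
          else res) acc
        = (l.filterMap (fun ip => if pvKeep mask ip.1 then some ip.2 else none)).foldl
            (fun res pair =>
              (PySem.List.pyRange 0 order 1).foldl
                (fun r j => PySem.List.pySetD r j (PySem.List.pyGetD r j [] ++ [PySem.List.pyGetD pair j 0])) res) acc := by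
  intro l
  induction l with
  | nil => intro acc; rfl
  | cons x t ih => intro acc; by_cases h : pvKeep mask x.1 <;> simp [h, ih]

-- the inner Python loop, written over List.range with Nat indexing
theorem pv_inner_eq (order : Int) (pair : List Int) (res : List (List Int)) :
    (PySem.List.pyRange 0 order 1).foldl
        (fun r j => PySem.List.pySetD r j (PySem.List.pyGetD r j [] ++ [PySem.List.pyGetD pair j 0])) res
      = (List.range order.toNat).foldl (fun r t => r.set t (r.getD t [] ++ [pair.getD t 0])) res := by
  simp [PySem.List.pyRange_one, List.foldl_map]

-- the set-based inner loop IS column-wise append (on the processed prefix)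
theorem pv_setfold (pair : List Int) :
    ∀ (m : Nat) (res : List (List Int)), m ≤ res.length → m ≤ pair.length →
      (List.range m).foldl (fun r t => r.set t (r.getD t [] ++ [pair.getD t 0])) res
        = List.zipWith (fun col x => col ++ [x]) (res.take m) (pair.take m) ++ res.drop m := by
  intro m
  induction m with
  | zero => intro res _ _; simp
  | succ m ih =>
    intro res h1 h2
    rw [List.range_succ, List.foldl_append, ih res (by omega) (by omega)]
    have hz : (List.zipWith (fun col x => col ++ [x]) (res.take m) (pair.take m)).length = m := by
      simp; omega
    have hm1 : m < res.length := by omega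
    have hm2 : m < pair.length := by omega
    simp only [List.foldl_cons, List.foldl_nil]
    rw [List.set_append_right _ _ (by omega)]
    have hgetD : (List.zipWith (fun col x => col ++ [x]) (res.take m) (pair.take m) ++ res.drop m).getD m []
        = res[m] := by
      rw [List.getD_eq_getElem?_getD, List.getElem?_append_right (by omega), hz]
      simp [hm1]
    rw [hgetD, hz, Nat.sub_self, List.drop_eq_getElem_cons hm1, List.set_cons_zero]
    rw [List.take_add_one, List.take_add_one,
        List.getElem?_eq_getElem hm1, List.getElem?_eq_getElem hm2]
    rw [List.zipWith_append (by simp; omega)]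
    simp [List.getD_eq_getElem?_getD, List.getElem?_eq_getElem hm2]

-- folding pvZipApp from empty columns produces the column map (the transpose)
theorem pv_colfold (k : Nat) :
    ∀ (ps : List (List Int)) (acc : List (List Int)), acc.length = k → (∀ p ∈ ps, p.length = k) →
      ps.foldl pvZipApp acc
        = (List.range k).map (fun j => acc.getD j [] ++ ps.map (fun p => p.getD j 0)) := by
  intro ps
  induction ps with
  | nil =>
    intro acc h _
    apply List.ext_getElem (by simp [h])
    intro i h1 h2
    simp at h2
    simp [List.getD_eq_getElem?_getD, List.getElem?_eq_getElem (by omega : i < acc.length)]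
  | cons p t ih =>
    intro acc h hall
    have hp : p.length = k := hall p (List.mem_cons_self ..)
    rw [List.foldl_cons,
        ih (pvZipApp acc p) (by simp [pvZipApp, h, hp]) (fun q hq => hall q (List.mem_cons_of_mem _ hq))]
    apply List.map_congr_left
    intro j hj
    have hj' : j < k := List.mem_range.mp hj
    have hacc : (pvZipApp acc p).getD j [] = acc.getD j [] ++ [p.getD j 0] := by
      simp [pvZipApp, List.getD_eq_getElem?_getD,
        List.getElem?_eq_getElem (by simp [h, hp]; omega : j < (List.zipWith (fun col x => col ++ [x]) acc p).length),
        List.getElem?_eq_getElem (by omega : j < acc.length),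
        List.getElem?_eq_getElem (by omega : j < p.length)]
    rw [hacc]
    simp

-- the range-fold inner loop over all kept rows is the pvZipApp fold
theorem pv_kept_fold (k : Nat) :
    ∀ (ps : List (List Int)) (acc : List (List Int)), acc.length = k → (∀ p ∈ ps, p.length = k) →
      ps.foldl (fun res pair => (List.range k).foldl (fun r t => r.set t (r.getD t [] ++ [pair.getD t 0])) res) acc
        = ps.foldl pvZipApp acc := by
  intro ps
  induction ps with
  | nil => intro acc _ _; rfl
  | cons p t ih =>
    intro acc h hall
    have hp : p.length = k := hall p (List.mem_cons_self ..)
    rw [List.foldl_cons, List.foldl_cons,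
        pv_setfold p k acc (by omega) (by omega)]
    rw [List.take_of_length_le (by omega), List.take_of_length_le (by omega),
        List.drop_eq_nil_of_le (by omega), List.append_nil]
    exact ih (pvZipApp acc p) (by simp [pvZipApp, h, hp]) (fun q hq => hall q (List.mem_cons_of_mem _ hq))

-- the running-min of equal row lengths is that length
theorem pv_minfold (k : Nat) :
    ∀ (rs : List (List Int)), (∀ l ∈ rs, l.length = k) → rs.foldl (fun m l => min m l.length) k = k := by
  intro rs
  induction rs with
  | nil => intro _; rfl
  | cons x t ih =>
    intro h
    have hx : x.length = k := h x (List.mem_cons_self ..)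
    simp only [List.foldl_cons, hx, min_self]
    exact ih (fun l hl => h l (List.mem_cons_of_mem _ hl))

-- every kept row is a combination, hence has length order.toNat
theorem pv_kept_len (ranges : List Int) (mask : Option (List Int)) (order : Int) :
    ∀ p ∈ (PySem.List.enumerate (PySem.List.combinations ranges order.toNat) 0).filterMap
        (fun ip => if pvKeep mask ip.1 then some ip.2 else none),
      p.length = order.toNat := by
  intro p hp
  obtain ⟨ip, hmem, hsome⟩ := List.mem_filterMap.mp hp
  split at hsome
  · cases hsome
    obtain ⟨k', hk, rfl⟩ := (PySem.List.mem_enumerate_iff _ _ _).mp hmem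
    exact PySem.List.length_of_mem_combinations (List.getElem_mem hk)
  · cases hsome

-- ===== VERDICT (by name: the statement is the Claim_ definition above) =====
theorem generate_pairs_spec : Claim_equal_generate_pairs := by
  intro ranges mask order _ _
  unfold Spec_generate_pairs generate_pairs generate_pairs_alt
  have hkl := pv_kept_len ranges mask order
  set kept := (PySem.List.enumerate (PySem.List.combinations ranges order.toNat) 0).filterMap
      (fun ip => if pvKeep mask ip.1 then some ip.2 else none) with hkept
  rw [pv_initfold, List.nil_append, PySem.List.length_pyRange_one]
  have hlen : ((order - 0).toNat) = order.toNat := by omega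
  rw [hlen, pvA_filter]
  have hfold : ∀ (ps : List (List Int)) (acc : List (List Int)),
      ps.foldl (fun res pair =>
        (PySem.List.pyRange 0 order 1).foldl
          (fun r j => PySem.List.pySetD r j (PySem.List.pyGetD r j [] ++ [PySem.List.pyGetD pair j 0])) res) acc
      = ps.foldl (fun res pair => (List.range order.toNat).foldl (fun r t => r.set t (r.getD t [] ++ [pair.getD t 0])) res) acc := by
    intro ps
    induction ps with
    | nil => intro acc; rfl
    | cons q t ih => intro acc; rw [List.foldl_cons, List.foldl_cons, pv_inner_eq, ih]
  rw [hfold, pv_kept_fold order.toNat kept _ (by simp) hkl,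
      pv_colfold order.toNat kept _ (by simp) hkl]
  cases hk : kept with
  | nil =>
    simp only [List.isEmpty_nil, if_true, List.map_nil]
    apply List.ext_getElem (by simp)
    intro i h1 h2
    simp at h1 h2
    simp [List.getElem_range, List.getD_eq_getElem?_getD]
  | cons r rs =>
    have hr : r.length = order.toNat := hkl r (hk ▸ List.mem_cons_self ..)
    have hrs : ∀ l ∈ rs, l.length = order.toNat := fun l hl => hkl l (hk ▸ List.mem_cons_of_mem _ hl)
    simp only [List.isEmpty_cons, if_false, Bool.false_eq_true]
    show _ = (List.range (rs.foldl (fun m l => min m l.length) r.length)).map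
        (fun j => (r :: rs).map (fun p => p.getD j 0))
    rw [hr, pv_minfold order.toNat rs hrs]
    apply List.map_congr_left
    intro j hj
    have hj' : j < order.toNat := List.mem_range.mp hj
    simp [List.getD_eq_getElem?_getD]
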